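-- pv_equiv track=rewrite | github.com/rishitsaboo/leetcode | codes.py | findLeastGreater
-- ===== SOURCE A (Python) =====
-- def findLeastGreater(n, arr):
--   for i in range(n):
--     smallest = None
--     for j in range(i+1,n):
--       if arr[j] > arr[i]:
--         if smallest is None or arr[j] < smallest:
--           smallest = arr[j]
--     arr[i] = smallest if smallest is not None else -1
--   return arr
-- ===== SOURCE B (Python) =====
-- def findLeastGreater(n, arr):
--     s = []  # sorted values of the suffix already processed
--     for i in range(n - 1, -1, -1):
--         x = arr[i]
--         lo, hi = 0, len(s)
--         while lo < hi:  # binary search: first position with s[pos] > x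
--             mid = (lo + hi) // 2
--             if s[mid] <= x:
--                 lo = mid + 1
--             else:
--                 hi = mid
--         arr[i] = s[lo] if lo < len(s) else -1
--         s.insert(lo, x)
--     return arr
-- ===== Notes on version B (the rewrite author's own statement) =====
-- stated objective: faster
-- what changed: Replaces A's quadratic nested scan (for each i, rescan arr[i+1:n] for the least greater element) by a single right-to-left in-place pass that keeps the already-seen suffix values in a sorted list and binary-searches it for the least greater element.
import Mathlib
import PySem

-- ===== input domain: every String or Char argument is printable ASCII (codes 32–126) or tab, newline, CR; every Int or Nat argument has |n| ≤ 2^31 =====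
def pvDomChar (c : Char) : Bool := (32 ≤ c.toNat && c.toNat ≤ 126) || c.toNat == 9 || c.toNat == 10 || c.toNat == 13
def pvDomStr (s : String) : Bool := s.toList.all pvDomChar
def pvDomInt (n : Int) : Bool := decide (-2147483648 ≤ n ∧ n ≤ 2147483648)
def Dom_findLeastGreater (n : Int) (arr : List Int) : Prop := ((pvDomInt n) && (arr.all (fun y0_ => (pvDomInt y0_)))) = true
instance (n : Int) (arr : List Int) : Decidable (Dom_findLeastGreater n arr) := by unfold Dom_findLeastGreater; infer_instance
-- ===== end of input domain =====

-- B replaces A's quadratic nested scan by a right-to-left in-place pass keeping the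
-- already-seen suffix values in a sorted list and binary-searching it for the least
-- greater element (measured faster in a timing run). Both A and B mutate `arr`
-- in place in Python; the equivalence proved here is about the RETURN value.

-- ===== PORT A =====
-- inner loop 'for j in range(i+1, n)': running least value among arr[j] > arr[i]
-- (arr[i] is unchanged during the inner loop, so it is read once as `ai`)
def fLGinner (arr : List Int) (ai : Int) (smallest : Option Int) (j : Int) : Option Int :=
  match PySem.List.pyGet? arr j with
  | none => smallest                    -- Python raises IndexError here; excluded by Pre_
  | some aj =>
    if aj > ai then
      match smallest with
      | none => some aj
      | some s => if aj < s then some aj else smallest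
    else smallest

-- one iteration of the outer loop: compute `smallest`, then 'arr[i] = smallest or -1'
def fLGstep (n : Int) (arr : List Int) (i : Int) : List Int :=
  match PySem.List.pyGet? arr i with
  | none => arr                         -- Python raises IndexError here; excluded by Pre_
  | some ai =>
    let smallest := (PySem.List.pyRange (i + 1) n 1).foldl (fLGinner arr ai) none
    PySem.List.pySetD arr i (match smallest with | none => -1 | some v => v)

def findLeastGreater (n : Int) (arr : List Int) : List Int :=
  (PySem.List.pyRange 0 n 1).foldl (fLGstep n) arr

-- ===== PORT B =====
-- hand-written binary search of Source B: first position lo in s[lo0:hi0] with s[lo] > x.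
-- s[mid] is ported as getD: every call keeps mid < hi ≤ len s, so the index is in range
-- exactly as in the Python, which never raises here.
def fLGsearch (s : List Int) (x : Int) (lo hi : Nat) : Nat :=
  if _h : lo < hi then
    if s.getD ((lo + hi) / 2) 0 ≤ x then fLGsearch s x ((lo + hi) / 2 + 1) hi
    else fLGsearch s x lo ((lo + hi) / 2)
  else lo
termination_by hi - lo
decreasing_by all_goals omega

-- one iteration of Source B's loop; state = (arr, s)
def fLGstepB (st : List Int × List Int) (i : Int) : List Int × List Int :=
  match PySem.List.pyGet? st.1 i with
  | none => st                          -- Python raises IndexError here; excluded by Pre_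
  | some x =>
    let lo := fLGsearch st.2 x 0 st.2.length
    (PySem.List.pySetD st.1 i (if lo < st.2.length then st.2.getD lo 0 else -1),
     PySem.List.insert st.2 (lo : Int) x)

def findLeastGreater_alt (n : Int) (arr : List Int) : List Int :=
  ((PySem.List.pyRange (n - 1) (-1) (-1)).foldl fLGstepB (arr, [])).1

-- ===== PRECONDITION & SPEC =====
-- Pre_: exactly the inputs where Python A returns: n > len(arr) makes A's arr[j] raise IndexError.
def Pre_findLeastGreater (n : Int) (arr : List Int) : Prop := n ≤ (arr.length : Int)
instance (n : Int) (arr : List Int) : Decidable (Pre_findLeastGreater n arr) := by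
  unfold Pre_findLeastGreater; infer_instance

def pvWitness_findLeastGreater : Int × List Int := (4, [8, 58, 71, 18])

def Spec_findLeastGreater (n : Int) (arr : List Int) (out : List Int) : Prop := out = findLeastGreater_alt n arr
instance (n : Int) (arr : List Int) (out : List Int) : Decidable (Spec_findLeastGreater n arr out) := by unfold Spec_findLeastGreater; infer_instance

-- ===== CLAIM (what is proved, stated in full; the proofs are below) =====
def Claim_equal_findLeastGreater : Prop := ∀ (n : Int) (arr : List Int), Dom_findLeastGreater n arr → Pre_findLeastGreater n arr → Spec_findLeastGreater n arr (findLeastGreater n arr)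

-- ===== LEMMAS AND PROOFS =====

-- the common specification: each of the first n elements is replaced by the minimum of the
-- strictly greater elements in its (original) tail, -1 if there is none
def specMap : List Int → List Int
  | [] => []
  | x :: xs => ((xs.filter (fun a => x < a)).min?.getD (-1)) :: specMap xs

-- A's inner accumulator loop computes min? of the filtered list
lemma lgfold_some (ai s : Int) (l : List Int) :
    l.foldl (fun acc aj => if aj > ai then
        (match acc with
          | none => some aj
          | some s => if aj < s then some aj else acc)
        else acc) (some s)
    = some ((l.filter (fun a => ai < a)).foldl min s) := by
  induction l generalizing s with
  | nil => rfl
  | cons aj l ih =>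
    by_cases h : ai < aj
    · have : (if aj < s then some aj else some s) = some (min s aj) := by
        by_cases h' : aj < s
        · rw [if_pos h', min_def, if_neg (by omega)]
        · rw [if_neg h', min_def, if_pos (by omega)]
      simp [List.foldl_cons, h, this, ih]
    · simp [List.foldl_cons, h, ih]

lemma lgfold_none (ai : Int) (l : List Int) :
    l.foldl (fun acc aj => if aj > ai then
        (match acc with
          | none => some aj
          | some s => if aj < s then some aj else acc)
        else acc) none
    = (l.filter (fun a => ai < a)).min? := by
  induction l with
  | nil => rfl
  | cons aj l ih =>
    by_cases h : ai < aj
    · rw [List.foldl_cons]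
      simp only [show aj > ai from h, if_pos]
      rw [lgfold_some, List.filter_cons_of_pos (by simpa using h), List.min?_cons']
    · simp [List.foldl_cons, h, ih]

-- A's inner loop over the index range [pre2.length, pre2.length + xs.length) reads exactly
-- the elements of xs
lemma inner_eq (pre2 xs rest : List Int) (ai : Int) (acc : Option Int) :
    (PySem.List.pyRange (pre2.length : Int) ((pre2.length : Int) + (xs.length : Int)) 1).foldl
      (fLGinner (pre2 ++ xs ++ rest) ai) acc
    = xs.foldl (fun acc aj => if aj > ai then
        (match acc with
          | none => some aj
          | some s => if aj < s then some aj else acc)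
        else acc) acc := by
  induction xs generalizing pre2 acc with
  | nil => simp [PySem.List.pyRange_one_eq_nil (le_refl _)]
  | cons y ys ih =>
    rw [PySem.List.pyRange_one_cons (by simp), List.foldl_cons]
    have harr : pre2 ++ (y :: ys) ++ rest = pre2 ++ y :: (ys ++ rest) := by simp
    have hstep : fLGinner (pre2 ++ (y :: ys) ++ rest) ai acc (pre2.length : Int)
        = (if y > ai then
            (match acc with
              | none => some y
              | some s => if y < s then some y else acc)
          else acc) := by
      rw [fLGinner, harr, PySem.List.pyGet?_append_length]
    rw [hstep]
    have hre : pre2 ++ (y :: ys) ++ rest = (pre2 ++ [y]) ++ ys ++ rest := by simp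
    have hlen : ((pre2 ++ [y]).length : Int) = (pre2.length : Int) + 1 := by simp
    have hbound : (pre2.length : Int) + ((y :: ys).length : Int)
        = ((pre2 ++ [y]).length : Int) + (ys.length : Int) := by simp; omega
    rw [hre, hbound, ← hlen, ih, List.foldl_cons]

-- A's outer loop, peeling off the unprocessed part `suf`
lemma A_loop (pre suf rest : List Int) :
    (PySem.List.pyRange (pre.length : Int) ((pre.length : Int) + (suf.length : Int)) 1).foldl
      (fLGstep ((pre.length : Int) + (suf.length : Int))) (pre ++ suf ++ rest)
    = pre ++ specMap suf ++ rest := by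
  induction suf generalizing pre with
  | nil => simp [PySem.List.pyRange_one_eq_nil (le_refl _), specMap]
  | cons x xs ih =>
    rw [PySem.List.pyRange_one_cons (by simp), List.foldl_cons]
    set N : Int := (pre.length : Int) + ((x :: xs).length : Int) with hN
    have hv : fLGstep N (pre ++ (x :: xs) ++ rest) (pre.length : Int)
        = pre ++ ((xs.filter (fun a => x < a)).min?.getD (-1)) :: (xs ++ rest) := by
      rw [fLGstep]
      have harr : pre ++ (x :: xs) ++ rest = pre ++ x :: (xs ++ rest) := by simp
      rw [harr, PySem.List.pyGet?_append_length]
      have hinner : (PySem.List.pyRange ((pre.length : Int) + 1) N 1).foldl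
          (fLGinner (pre ++ x :: (xs ++ rest)) x) none
          = (xs.filter (fun a => x < a)).min? := by
        have h1 : pre ++ x :: (xs ++ rest) = (pre ++ [x]) ++ xs ++ rest := by simp
        have h2 : ((pre.length : Int) + 1) = ((pre ++ [x]).length : Int) := by simp
        have h3 : N = ((pre ++ [x]).length : Int) + (xs.length : Int) := by
          rw [hN]; simp; omega
        rw [h1, h2, h3, inner_eq, lgfold_none]
      simp only [hinner]
      rw [PySem.List.pySetD_of_nonneg _ _ (by omega)]
      have : ((pre.length : Int)).toNat = pre.length := by omega
      rw [this]
      rcases hm : (xs.filter (fun a => x < a)).min? with _ | v <;> simp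
    rw [hv]
    have h4 : pre ++ ((xs.filter (fun a => x < a)).min?.getD (-1)) :: (xs ++ rest)
        = (pre ++ [(xs.filter (fun a => x < a)).min?.getD (-1)]) ++ xs ++ rest := by simp
    have h5 : (pre.length : Int) + 1 = (((pre ++ [(xs.filter (fun a => x < a)).min?.getD (-1)]).length : Int)) := by simp
    have h6 : N = ((pre ++ [(xs.filter (fun a => x < a)).min?.getD (-1)]).length : Int) + (xs.length : Int) := by
      rw [hN]; simp; omega
    rw [h4, h5]
    calc (PySem.List.pyRange ((pre ++ [(xs.filter (fun a => x < a)).min?.getD (-1)]).length : Int) (((pre.length : Int) + ((x :: xs).length : Int))) 1).foldl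
          (fLGstep N) ((pre ++ [(xs.filter (fun a => x < a)).min?.getD (-1)]) ++ xs ++ rest)
        = pre ++ specMap (x :: xs) ++ rest := by
          rw [show ((pre.length : Int) + ((x :: xs).length : Int)) = N from hN.symm, h6, ih]
          simp [specMap]

-- sorted list utilities -------------------------------------------------------

lemma min?_perm (l1 l2 : List Int) (h : l1.Perm l2) : l1.min? = l2.min? := by
  rcases h1 : l1.min? with _ | a
  · rw [List.min?_eq_none_iff] at h1
    subst h1
    simp [h.nil_eq.symm]
  · rw [List.min?_eq_some_iff] at h1
    symm
    rw [List.min?_eq_some_iff]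
    exact ⟨h.mem_iff.mp h1.1, fun b hb => h1.2 b (h.mem_iff.mpr hb)⟩

lemma min?_sorted_head (l : List Int) (h : l.Pairwise (· ≤ ·)) : l.min? = l.head? := by
  cases l with
  | nil => rfl
  | cons a t =>
    rw [List.min?_cons', List.head?_cons]
    congr 1
    have hle : ∀ y ∈ t, a ≤ y := (List.pairwise_cons.mp h).1
    clear h
    induction t with
    | nil => rfl
    | cons b u ih =>
      rw [List.foldl_cons, min_eq_left (hle b List.mem_cons_self)]
      exact ih (fun y hy => hle y (List.mem_cons_of_mem _ hy))

-- binary search: fLGsearch keeps the split-point invariant (fuel d ≥ hi - lo)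
lemma search_rec (s : List Int) (x : Int) (hs : s.Pairwise (· ≤ ·)) :
    ∀ (d lo hi : Nat), hi - lo ≤ d → hi ≤ s.length → lo ≤ hi →
    (∀ j (hj : j < s.length), j < lo → s[j] ≤ x) →
    (∀ j (hj : j < s.length), hi ≤ j → x < s[j]) →
    fLGsearch s x lo hi ≤ s.length ∧
    (∀ j (hj : j < s.length), j < fLGsearch s x lo hi → s[j] ≤ x) ∧
    (∀ j (hj : j < s.length), fLGsearch s x lo hi ≤ j → x < s[j]) := by
  intro d
  induction d with
  | zero =>
    intro lo hi hd hhi hlo hbelow habove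
    have : lo = hi := by omega
    subst this
    rw [fLGsearch]
    simp only [lt_irrefl, dif_neg, not_false_iff]
    exact ⟨by omega, fun j hj hjlo => hbelow j hj hjlo, fun j hj hjlo => habove j hj hjlo⟩
  | succ d ih =>
    intro lo hi hd hhi hlo hbelow habove
    rw [fLGsearch]
    by_cases h : lo < hi
    · rw [dif_pos h]
      have hmid : (lo + hi) / 2 < s.length := by omega
      rw [List.getD_eq_getElem s 0 hmid]
      by_cases hc : s[(lo + hi) / 2] ≤ x
      · rw [if_pos hc]
        apply ih ((lo + hi) / 2 + 1) hi (by omega) hhi (by omega)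
        · intro j hj hjlt
          rcases Nat.lt_or_ge j ((lo + hi) / 2) with h' | h'
          · exact le_trans (List.pairwise_iff_getElem.mp hs j _ hj hmid h') hc
          · have : j = (lo + hi) / 2 := by omega
            subst this; exact hc
        · exact habove
      · rw [if_neg hc]
        apply ih lo ((lo + hi) / 2) (by omega) (by omega) (by omega)
        · exact hbelow
        · intro j hj hjge
          rcases Nat.lt_or_ge ((lo + hi) / 2) j with h' | h'
          · exact lt_of_lt_of_le (by omega) (List.pairwise_iff_getElem.mp hs _ j hmid hj h')
          · have : j = (lo + hi) / 2 := by omega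
            subst this; omega
    · rw [dif_neg h]
      have : lo = hi := by omega
      subst this
      exact ⟨by omega, fun j hj hjlo => hbelow j hj hjlo, fun j hj hjlo => habove j hj hjlo⟩

lemma search_spec (s : List Int) (x : Int) (hs : s.Pairwise (· ≤ ·)) :
    fLGsearch s x 0 s.length ≤ s.length ∧
    (∀ j (hj : j < s.length), j < fLGsearch s x 0 s.length → s[j] ≤ x) ∧
    (∀ j (hj : j < s.length), fLGsearch s x 0 s.length ≤ j → x < s[j]) :=
  search_rec s x hs s.length 0 s.length (by omega) (by omega) (by omega)
    (by omega) (fun j hj h => by omega)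

-- the filtered tail of a sorted list is its part after the search's split point
lemma filter_eq_drop_search (s : List Int) (x : Int) (hs : s.Pairwise (· ≤ ·)) :
    s.filter (fun a => x < a) = s.drop (fLGsearch s x 0 s.length) := by
  obtain ⟨hK, hbelow, habove⟩ := search_spec s x hs
  set K := fLGsearch s x 0 s.length with hKdef
  conv_lhs => rw [← List.take_append_drop K s]
  rw [List.filter_append]
  have h1 : (s.take K).filter (fun a => x < a) = [] := by
    rw [List.filter_eq_nil_iff]
    intro a ha
    obtain ⟨j, hj, rfl⟩ := List.mem_take_iff_getElem.mp ha
    simp only [decide_eq_true_eq, not_lt]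
    exact hbelow j (by omega) (by omega)
  have h2 : (s.drop K).filter (fun a => x < a) = s.drop K := by
    rw [List.filter_eq_self]
    intro a ha
    obtain ⟨j, hj, rfl⟩ := List.mem_drop_iff_getElem.mp ha
    simp only [decide_eq_true_eq]
    exact habove (K + j) (by omega) (by omega)
  rw [h1, h2, List.nil_append]

-- the value Source B writes for x against the sorted suffix q
lemma report_eq (q : List Int) (x : Int) :
    (if fLGsearch (List.insertionSort (· ≤ ·) q) x 0 (List.insertionSort (· ≤ ·) q).length
          < (List.insertionSort (· ≤ ·) q).length
     then (List.insertionSort (· ≤ ·) q).getD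
          (fLGsearch (List.insertionSort (· ≤ ·) q) x 0 (List.insertionSort (· ≤ ·) q).length) 0
     else -1)
    = (q.filter (fun a => x < a)).min?.getD (-1) := by
  have hs : (List.insertionSort (· ≤ ·) q).Pairwise (· ≤ ·) :=
    List.sorted_insertionSort _ q
  set s := List.insertionSort (· ≤ ·) q with hsdef
  set K := fLGsearch s x 0 s.length with hKdef
  obtain ⟨hK, hbelow, habove⟩ := search_spec s x hs
  have hperm : (s.filter (fun a => x < a)).Perm (q.filter (fun a => x < a)) :=
    (List.perm_insertionSort _ q).filter _
  rw [← min?_perm _ _ hperm, filter_eq_drop_search s x hs, ← hKdef]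
  rw [min?_sorted_head _ (hs.drop), List.head?_drop]
  by_cases h : K < s.length
  · rw [if_pos h, List.getD_eq_getElem s 0 h, List.getElem?_eq_getElem h, Option.getD_some]
  · rw [if_neg h, List.getElem?_eq_none (by omega), Option.getD_none]

-- inserting x at the split point is insertion-sorting x into the sorted suffix
lemma insert_eq_sort (q : List Int) (x : Int) :
    PySem.List.insert (List.insertionSort (· ≤ ·) q)
      ((fLGsearch (List.insertionSort (· ≤ ·) q) x 0 (List.insertionSort (· ≤ ·) q).length : Nat) : Int) x
    = List.insertionSort (· ≤ ·) (x :: q) := by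
  have hs : (List.insertionSort (· ≤ ·) q).Pairwise (· ≤ ·) :=
    List.sorted_insertionSort _ q
  set s := List.insertionSort (· ≤ ·) q with hsdef
  set K := fLGsearch s x 0 s.length with hKdef
  obtain ⟨hK, hbelow, habove⟩ := search_spec s x hs
  rw [PySem.List.insert_natCast _ _ _ hK]
  have hsorted : List.Pairwise (fun a b : Int => a ≤ b) (s.take K ++ x :: s.drop K) := by
    rw [List.pairwise_append]
    refine ⟨hs.take, ?_, ?_⟩
    · rw [List.pairwise_cons]
      refine ⟨?_, hs.drop⟩
      intro a ha
      obtain ⟨j, hj, rfl⟩ := List.mem_drop_iff_getElem.mp ha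
      exact le_of_lt (habove (K + j) (by omega) (by omega))
    · intro a ha b hb
      obtain ⟨j, hj, rfl⟩ := List.mem_take_iff_getElem.mp ha
      have h1 := hbelow j (by omega) (by omega)
      rcases List.mem_cons.mp hb with rfl | hb'
      · exact h1
      · obtain ⟨i, hi, rfl⟩ := List.mem_drop_iff_getElem.mp hb'
        exact le_trans h1 (le_of_lt (habove (K + i) (by omega) (by omega)))
  have hperm : (s.take K ++ x :: s.drop K).Perm (List.insertionSort (· ≤ ·) (x :: q)) := by
    have h1 : (s.take K ++ x :: s.drop K).Perm (x :: s) := by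
      have h0 := @List.perm_middle _ x (s.take K) (s.drop K)
      rwa [List.take_append_drop] at h0
    exact h1.trans (((List.perm_insertionSort _ q).cons x).trans
      (List.perm_insertionSort _ (x :: q)).symm)
  exact List.eq_of_perm_of_sorted (fun a b _ _ h1 h2 => le_antisymm h1 h2)
    hsorted (List.sorted_insertionSort _ _) hperm

-- B's loop, peeling off the unprocessed prefix `p` (original values) from the right;
-- the processed part already holds specMap q and s is the sorted originals q
lemma B_loop (p q rest : List Int) :
    (PySem.List.pyRange ((p.length : Int) - 1) (-1) (-1)).foldl fLGstepB
      (p ++ specMap q ++ rest, List.insertionSort (· ≤ ·) q)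
    = (specMap (p ++ q) ++ rest, List.insertionSort (· ≤ ·) (p ++ q)) := by
  induction p using List.reverseRecOn generalizing q with
  | nil => rw [PySem.List.pyRange_neg_one_eq_nil (by simp)]; rfl
  | append_singleton p' x ih =>
    rw [show (((p' ++ [x]).length : Int) - 1) = (p'.length : Int) by simp]
    rw [PySem.List.pyRange_neg_one_cons (by omega : (-1 : Int) < (p'.length : Int)), List.foldl_cons]
    have hstep : fLGstepB ((p' ++ [x]) ++ specMap q ++ rest, List.insertionSort (· ≤ ·) q)
        ((p'.length : Int))
        = (p' ++ specMap (x :: q) ++ rest, List.insertionSort (· ≤ ·) (x :: q)) := by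
      rw [fLGstepB]
      have harr : (p' ++ [x]) ++ specMap q ++ rest = p' ++ x :: (specMap q ++ rest) := by simp
      simp only [harr, PySem.List.pyGet?_append_length]
      have h1 := report_eq q x
      have h2 := insert_eq_sort q x
      simp only [] at h1 h2 ⊢
      rw [h1, h2]
      rw [PySem.List.pySetD_of_nonneg _ _ (by omega)]
      have hT : ((p'.length : Int)).toNat = p'.length := by omega
      rw [hT]
      have hset : (p' ++ x :: (specMap q ++ rest)).set p'.length
          ((q.filter (fun a => x < a)).min?.getD (-1))
          = p' ++ specMap (x :: q) ++ rest := by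
        rw [List.set_append_right _ _ (le_refl _)]
        simp [specMap]
      rw [hset]
    rw [hstep]
    have hre : p' ++ specMap (x :: q) ++ rest
        = p' ++ specMap (x :: q) ++ rest := rfl
    rw [ih (x :: q)]
    have hfin : p' ++ (x :: q) = (p' ++ [x]) ++ q := by simp
    rw [hfin]

-- ===== VERDICT (by name: the statement is the Claim_ definition above) =====
theorem findLeastGreater_spec : Claim_equal_findLeastGreater := by
  intro n arr _ hpre
  unfold Spec_findLeastGreater
  unfold Pre_findLeastGreater at hpre
  by_cases hneg : n < 0
  · rw [findLeastGreater, findLeastGreater_alt]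
    rw [PySem.List.pyRange_one_eq_nil (by omega), PySem.List.pyRange_neg_one_eq_nil (by omega)]
    simp
  · push_neg at hneg
    set m := n.toNat with hmdef
    have hm : n = (m : Int) := by omega
    have hmlen : m ≤ arr.length := by omega
    have ht : arr = arr.take m ++ arr.drop m := (List.take_append_drop m arr).symm
    have hlent : (arr.take m).length = m := by rw [List.length_take]; omega
    have hA : findLeastGreater n arr = specMap (arr.take m) ++ arr.drop m := by
      have h := A_loop [] (arr.take m) (arr.drop m)
      simp only [List.length_nil, Nat.cast_zero, zero_add, List.nil_append] at h
      rw [findLeastGreater]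
      calc (PySem.List.pyRange 0 n 1).foldl (fLGstep n) arr
          = (PySem.List.pyRange 0 ((arr.take m).length : Int) 1).foldl
              (fLGstep ((arr.take m).length : Int)) (arr.take m ++ arr.drop m) := by
            rw [hlent, ← hm, ← ht]
        _ = specMap (arr.take m) ++ arr.drop m := h
    have hB : findLeastGreater_alt n arr = specMap (arr.take m) ++ arr.drop m := by
      have h := B_loop (arr.take m) [] (arr.drop m)
      simp only [List.append_nil, specMap] at h
      have hinit : (List.insertionSort (· ≤ ·) ([] : List Int)) = ([] : List Int) := rfl
      rw [hinit] at h
      rw [hlent] at h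
      rw [← ht] at h
      rw [findLeastGreater_alt, show n - 1 = (m : Int) - 1 by omega, h]
    rw [hA, hB]
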